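-- pv_equiv track=rewrite | github.com/AravindhanDev/ds_lab_programs | 18-01-2023_6.py | surroundNumbersByBrackets
-- ===== SOURCE A (Python) =====
-- def surroundNumbersByBrackets(string):
--     newStr = ''
--     numberStr = ''
--     for char in string:
--         if numberStr != '' and char.isdigit() == False:
--             newStr += numberStr + ']'
--             numberStr = ''
--         if char.isdigit():
--             if numberStr == '': numberStr = numberStr + '[' + char
--             else: numberStr += char
--         else: newStr += char
--     return newStr
-- ===== SOURCE B (Python) =====
-- def surroundNumbersByBrackets(string):
--     out = []
--     i = 0
--     n = len(string)
--     while i < n: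
--         k = string[i].isdigit()
--         j = i
--         while j < n and string[j].isdigit() == k:
--             j += 1
--         run = string[i:j]
--         out.append('[' + run + ']' if k else run)
--         i = j
--     return ''.join(out)
-- ===== Notes on version B (the rewrite author's own statement) =====
-- stated objective: alternative
-- what changed: B splits the string into maximal same-kind runs (digit / non-digit) with an explicit two-pointer scan and joins them, bracketing every digit run, instead of A's per-character state machine with a pending buffer that silently drops a trailing digit run.
-- intended difference: On strings whose last character is a digit, A drops the trailing digit run entirely (e.g. 'a1' -> 'a') because its pending buffer is never flushed at end of input, while B returns that run wrapped in brackets like every other digit run, which is the intended behaviour. — e.g. on surroundNumbersByBrackets("a1"): A returns "a", B returns "a[1]"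
import Mathlib
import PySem

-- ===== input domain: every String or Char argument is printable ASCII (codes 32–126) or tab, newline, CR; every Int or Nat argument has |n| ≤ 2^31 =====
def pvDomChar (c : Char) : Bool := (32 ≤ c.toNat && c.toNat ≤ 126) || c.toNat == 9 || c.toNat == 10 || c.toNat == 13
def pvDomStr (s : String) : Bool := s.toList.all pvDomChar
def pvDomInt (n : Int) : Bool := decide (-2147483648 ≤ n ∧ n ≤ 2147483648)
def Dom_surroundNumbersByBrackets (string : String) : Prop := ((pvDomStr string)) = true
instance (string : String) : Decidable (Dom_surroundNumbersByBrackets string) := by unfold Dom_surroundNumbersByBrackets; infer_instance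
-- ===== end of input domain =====

-- B splits the string into maximal digit/non-digit runs and brackets every digit run
-- (an alternative decomposition to A's per-character state machine); on strings ending
-- in a digit A drops the trailing digit run while B brackets it (stated in D_ below).

-- ===== PORT A =====
-- literal transliteration of A's character loop; the two Python string accumulators
-- newStr / numberStr are the two List Char accumulators (rebinding becomes lets).
def loopA : List Char → List Char → List Char → List Char
  | [], newStr, _ => newStr
  | c :: cs, newStr, numberStr =>
    let newStr1 := if numberStr ≠ [] ∧ c.isDigit = false then newStr ++ numberStr ++ [']'] else newStr
    let numberStr1 := if numberStr ≠ [] ∧ c.isDigit = false then [] else numberStr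
    if c.isDigit then
      if numberStr1 = [] then loopA cs newStr1 (numberStr1 ++ ['['] ++ [c])
      else loopA cs newStr1 (numberStr1 ++ [c])
    else loopA cs (newStr1 ++ [c]) numberStr1

def surroundNumbersByBrackets (string : String) : String :=
  String.ofList (loopA string.toList [] [])

-- ===== PORT B =====
-- Source B scans each maximal run of same-kind (digit / non-digit) characters with an
-- inner pointer; here the inner scan is takeWhile/dropWhile on the same predicate.
def groupsB : List Char → List (Bool × List Char)
  | [] => []
  | c :: cs =>
    if c.isDigit then
      (true, c :: cs.takeWhile (fun x => x.isDigit)) :: groupsB (cs.dropWhile (fun x => x.isDigit))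
    else
      (false, c :: cs.takeWhile (fun x => !x.isDigit)) :: groupsB (cs.dropWhile (fun x => !x.isDigit))
termination_by cs => cs.length
decreasing_by
  · exact Nat.lt_succ_of_le (List.length_dropWhile_le _ _)
  · exact Nat.lt_succ_of_le (List.length_dropWhile_le _ _)

def renderB (gs : List (Bool × List Char)) : List Char :=
  gs.flatMap (fun g => if g.1 then '[' :: g.2 ++ [']'] else g.2)

def surroundNumbersByBrackets_alt (string : String) : String :=
  String.ofList (renderB (groupsB string.toList))

-- ===== PRECONDITION & SPEC =====
-- On strings whose last character is a digit, A drops the trailing digit run entirely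
-- (its pending buffer is never flushed at end of input), while B returns it bracketed,
-- which is the intended behaviour of wrapping every digit run in brackets.
def D_surroundNumbersByBrackets (string : String) : Prop :=
  string.toList.getLast?.any Char.isDigit = true
instance (string : String) : Decidable (D_surroundNumbersByBrackets string) := by
  unfold D_surroundNumbersByBrackets; infer_instance

def Spec_surroundNumbersByBrackets (string : String) (out : String) : Prop :=
  ¬ D_surroundNumbersByBrackets string → out = surroundNumbersByBrackets_alt string
instance (string : String) (out : String) : Decidable (Spec_surroundNumbersByBrackets string out) := by
  unfold Spec_surroundNumbersByBrackets; infer_instance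

def pvDiffWitness_surroundNumbersByBrackets : String := "a1"
def pvDiffWitnessOut_surroundNumbersByBrackets : String × String := ("a", "a[1]")

-- ===== CLAIM (what is proved, stated in full; the proofs are below) =====
def Claim_unchanged_surroundNumbersByBrackets : Prop := ∀ (string : String), Dom_surroundNumbersByBrackets string → Spec_surroundNumbersByBrackets string (surroundNumbersByBrackets string)
def Claim_changed_surroundNumbersByBrackets : Prop := Dom_surroundNumbersByBrackets (pvDiffWitness_surroundNumbersByBrackets) ∧ D_surroundNumbersByBrackets (pvDiffWitness_surroundNumbersByBrackets) ∧ surroundNumbersByBrackets (pvDiffWitness_surroundNumbersByBrackets) = pvDiffWitnessOut_surroundNumbersByBrackets.1 ∧ surroundNumbersByBrackets_alt (pvDiffWitness_surroundNumbersByBrackets) = pvDiffWitnessOut_surroundNumbersByBrackets.2 ∧ pvDiffWitnessOut_surroundNumbersByBrackets.1 ≠ pvDiffWitnessOut_surroundNumbersByBrackets.2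
def Claim_exact_surroundNumbersByBrackets : Prop := ∀ (string : String), Dom_surroundNumbersByBrackets string → D_surroundNumbersByBrackets string → surroundNumbersByBrackets string ≠ surroundNumbersByBrackets_alt string

-- ===== LEMMAS AND PROOFS =====

-- A's result, characterised over runs: B's rendering with a trailing digit run dropped.
def Bdrop : List Char → List Char
  | [] => []
  | c :: cs =>
    if c.isDigit then
      if cs.dropWhile (fun x => x.isDigit) = [] then []
      else '[' :: c :: cs.takeWhile (fun x => x.isDigit) ++ ']' :: Bdrop (cs.dropWhile (fun x => x.isDigit))
    else c :: Bdrop cs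
termination_by cs => cs.length
decreasing_by
  · exact Nat.lt_succ_of_le (List.length_dropWhile_le _ _)
  · exact Nat.le_refl _

lemma Bdrop_cons (c : Char) (cs : List Char) :
    Bdrop (c :: cs) =
      if c.isDigit then
        if cs.dropWhile (fun x => x.isDigit) = [] then []
        else '[' :: c :: cs.takeWhile (fun x => x.isDigit) ++ ']' ::
          Bdrop (cs.dropWhile (fun x => x.isDigit))
      else c :: Bdrop cs := by
  rw [Bdrop]

lemma loopA_gen : ∀ (n : Nat) (cs : List Char), cs.length ≤ n →
    (∀ newStr, loopA cs newStr [] = newStr ++ Bdrop cs) ∧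
    (∀ newStr p, loopA cs newStr ('[' :: p) =
      newStr ++ (if cs.dropWhile (fun x => x.isDigit) = [] then []
                 else '[' :: p ++ cs.takeWhile (fun x => x.isDigit) ++ ']' ::
                      Bdrop (cs.dropWhile (fun x => x.isDigit)))) := by
  intro n
  induction n with
  | zero =>
    intro cs h
    have : cs = [] := List.length_eq_zero_iff.mp (Nat.le_zero.mp h)
    subst this
    constructor
    · intro newStr; simp [loopA, Bdrop]
    · intro newStr p; simp [loopA, List.dropWhile]
  | succ n ih =>
    intro cs h
    cases cs with
    | nil =>
      constructor
      · intro newStr; simp [loopA, Bdrop]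
      · intro newStr p; simp [loopA, List.dropWhile]
    | cons c cs =>
      have hlen : cs.length ≤ n := Nat.le_of_succ_le_succ h
      by_cases hc : c.isDigit
      · constructor
        · intro newStr
          have h2 := (ih cs hlen).2 newStr [c]
          rw [Bdrop_cons]
          simp only [loopA]
          simp only [hc, ne_eq, not_true_eq_false, Bool.true_eq_false, and_false, false_and,
            if_false, ite_false, if_true, ite_true, List.nil_append, reduceIte]
          rw [show ((['['] : List Char) ++ [c]) = ['[', c] from rfl]
          rw [h2]
          simp [hc, List.takeWhile_cons, List.dropWhile_cons]
        · intro newStr p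
          have h2 := (ih cs hlen).2 newStr (p ++ [c])
          simp only [loopA]
          simp only [hc, ne_eq, Bool.true_eq_false, and_false, if_false, ite_false,
            List.cons_ne_nil, not_false_eq_true, reduceCtorEq, reduceIte, if_true, ite_true]
          rw [show ('[' :: p ++ [c]) = '[' :: (p ++ [c]) by simp] at *
          rw [h2]
          simp [hc, List.takeWhile_cons, List.dropWhile_cons]
      · have hc' : c.isDigit = false := by simpa using hc
        constructor
        · intro newStr
          have h1 := (ih cs hlen).1 (newStr ++ [c])
          rw [Bdrop_cons]
          simp only [loopA]
          simp only [hc', ne_eq, not_true_eq_false, false_and, Bool.false_eq_true, if_false,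
            ite_false, reduceIte]
          rw [h1]
          simp [hc']
        · intro newStr p
          have h1 := (ih cs hlen).1 (newStr ++ ('[' :: p) ++ [']'] ++ [c])
          simp only [loopA]
          simp only [hc', ne_eq, List.cons_ne_nil, not_false_eq_true, true_and,
            Bool.false_eq_true, if_false, ite_false, reduceCtorEq, reduceIte, if_true, ite_true]
          rw [h1]
          simp [hc', List.takeWhile_cons, List.dropWhile_cons, Bdrop_cons]

lemma balt_cons_digit (c : Char) (cs : List Char) (hc : c.isDigit = true) :
    renderB (groupsB (c :: cs)) =
      '[' :: c :: cs.takeWhile (fun x => x.isDigit) ++ ']' ::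
        renderB (groupsB (cs.dropWhile (fun x => x.isDigit))) := by
  rw [groupsB]
  simp [hc, renderB]

lemma balt_cons_nondigit (c : Char) (cs : List Char) (hc : c.isDigit = false) :
    renderB (groupsB (c :: cs)) = c :: renderB (groupsB cs) := by
  cases cs with
  | nil =>
    rw [groupsB]
    simp [hc, renderB, groupsB]
  | cons d cs' =>
    by_cases hd : d.isDigit
    · rw [groupsB]
      simp [hc, renderB, List.takeWhile_cons, List.dropWhile_cons, hd]
    · have hd' : d.isDigit = false := by simpa using hd
      conv_lhs => rw [groupsB]
      conv_rhs => rw [groupsB]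
      simp [hc, hd', renderB, List.takeWhile_cons, List.dropWhile_cons]

lemma getLast?_dropWhile (p : Char → Bool) :
    ∀ (cs : List Char), cs.dropWhile p ≠ [] → (cs.dropWhile p).getLast? = cs.getLast? := by
  intro cs
  induction cs with
  | nil => intro h; simp [List.dropWhile] at h
  | cons c cs ih =>
    intro h
    by_cases hp : p c
    · rw [List.dropWhile_cons, if_pos hp] at h ⊢
      rw [ih h]
      have hcs : cs ≠ [] := by
        intro hnil; rw [hnil] at h; simp [List.dropWhile] at h
      cases cs with
      | nil => exact absurd rfl hcs
      | cons d ds => rw [List.getLast?_cons_cons]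
    · rw [List.dropWhile_cons, if_neg hp]

lemma last_digit_of_dropWhile_nil (cs : List Char) (hne : cs ≠ [])
    (h : cs.dropWhile (fun x => x.isDigit) = []) : cs.getLast?.any Char.isDigit = true := by
  have hall : ∀ x ∈ cs, x.isDigit := by
    intro x hx
    have := List.dropWhile_eq_nil_iff.mp h x hx
    simpa using this
  obtain ⟨x, hx⟩ := List.getLast?_isSome.mpr hne |> Option.isSome_iff_exists.mp
  rw [hx]
  simp only [Option.any_some]
  exact hall x (List.mem_of_getLast? hx)

lemma bdrop_eq_balt : ∀ (n : Nat) (cs : List Char), cs.length ≤ n →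
    cs.getLast?.any Char.isDigit = false → Bdrop cs = renderB (groupsB cs) := by
  intro n
  induction n with
  | zero =>
    intro cs h _
    have : cs = [] := List.length_eq_zero_iff.mp (Nat.le_zero.mp h)
    subst this
    simp [Bdrop, groupsB, renderB]
  | succ n ih =>
    intro cs h hlast
    cases cs with
    | nil => simp [Bdrop, groupsB, renderB]
    | cons c cs =>
      have hlen : cs.length ≤ n := Nat.le_of_succ_le_succ h
      by_cases hc : c.isDigit
      · have hcs : cs ≠ [] := by
          intro hnil; subst hnil
          simp [hc] at hlast
        have hlast' : cs.getLast?.any Char.isDigit = false := by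
          cases cs with
          | nil => exact absurd rfl hcs
          | cons d ds => rwa [List.getLast?_cons_cons] at hlast
        have hdd : cs.dropWhile (fun x => x.isDigit) ≠ [] := by
          intro hnil
          have := last_digit_of_dropWhile_nil cs hcs hnil
          rw [hlast'] at this; exact Bool.false_ne_true this
        have hlastdd : (cs.dropWhile (fun x => x.isDigit)).getLast?.any Char.isDigit = false := by
          rw [getLast?_dropWhile _ cs hdd]; exact hlast'
        rw [Bdrop_cons, if_pos hc, if_neg hdd, balt_cons_digit c cs hc]
        rw [ih (cs.dropWhile (fun x => x.isDigit))
          (Nat.le_trans (List.length_dropWhile_le _ _) hlen) hlastdd]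
      · have hc' : c.isDigit = false := by simpa using hc
        have hlast' : cs.getLast?.any Char.isDigit = false := by
          cases cs with
          | nil => simp [List.getLast?]
          | cons d ds => rwa [List.getLast?_cons_cons] at hlast
        rw [Bdrop_cons, if_neg (by simp [hc']), balt_cons_nondigit c cs hc', ih cs hlen hlast']

lemma bdrop_lt_balt : ∀ (n : Nat) (cs : List Char), cs.length ≤ n →
    cs.getLast?.any Char.isDigit = true →
    (Bdrop cs).length < (renderB (groupsB cs)).length := by
  intro n
  induction n with
  | zero =>
    intro cs h hlast
    have : cs = [] := List.length_eq_zero_iff.mp (Nat.le_zero.mp h)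
    subst this; simp at hlast
  | succ n ih =>
    intro cs h hlast
    cases cs with
    | nil => simp at hlast
    | cons c cs =>
      have hlen : cs.length ≤ n := Nat.le_of_succ_le_succ h
      by_cases hc : c.isDigit
      · by_cases hdd : cs.dropWhile (fun x => x.isDigit) = []
        · rw [Bdrop_cons, if_pos hc, if_pos hdd, balt_cons_digit c cs hc]
          simp
        · have hcs : cs ≠ [] := by
            intro hnil; subst hnil; simp [List.dropWhile] at hdd
          have hlast' : cs.getLast?.any Char.isDigit = true := by
            cases cs with
            | nil => exact absurd rfl hcs
            | cons d ds => rwa [List.getLast?_cons_cons] at hlast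
          have hlastdd : (cs.dropWhile (fun x => x.isDigit)).getLast?.any Char.isDigit = true := by
            rw [getLast?_dropWhile _ cs hdd]; exact hlast'
          have := ih (cs.dropWhile (fun x => x.isDigit))
            (Nat.le_trans (List.length_dropWhile_le _ _) hlen) hlastdd
          rw [Bdrop_cons, if_pos hc, if_neg hdd, balt_cons_digit c cs hc]
          simp only [List.length_cons, List.length_append]
          omega
      · have hc' : c.isDigit = false := by simpa using hc
        have hcs : cs ≠ [] := by
          intro hnil; subst hnil; simp [hc'] at hlast
        have hlast' : cs.getLast?.any Char.isDigit = true := by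
          cases cs with
          | nil => exact absurd rfl hcs
          | cons d ds => rwa [List.getLast?_cons_cons] at hlast
        have := ih cs hlen hlast'
        rw [Bdrop_cons, if_neg (by simp [hc']), balt_cons_nondigit c cs hc']
        simpa using this

lemma loopA_eq_bdrop (cs : List Char) : loopA cs [] [] = Bdrop cs := by
  have := (loopA_gen cs.length cs (Nat.le_refl _)).1 []
  simpa using this

-- ===== VERDICT (by name: the statement is the Claim_ definition above) =====
theorem surroundNumbersByBrackets_spec : Claim_unchanged_surroundNumbersByBrackets := by
  intro s _ hD
  unfold surroundNumbersByBrackets surroundNumbersByBrackets_alt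
  rw [loopA_eq_bdrop]
  have hlast : s.toList.getLast?.any Char.isDigit = false := by
    unfold D_surroundNumbersByBrackets at hD
    simpa using hD
  rw [bdrop_eq_balt s.toList.length s.toList (Nat.le_refl _) hlast]

theorem surroundNumbersByBrackets_changed : Claim_changed_surroundNumbersByBrackets := by
  unfold Claim_changed_surroundNumbersByBrackets
  refine ⟨by decide, by decide, by decide, ?_, by decide⟩
  show String.ofList (renderB (groupsB "a1".toList)) = "a[1]"
  have h : "a1".toList = ['a', '1'] := by decide
  have hg : groupsB ['a', '1'] = [(false, ['a']), (true, ['1'])] := by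
    have ha : 'a'.isDigit = false := by decide
    have h1 : '1'.isDigit = true := by decide
    rw [groupsB]
    simp [ha, h1, List.takeWhile, List.dropWhile, groupsB]
  rw [h, hg]
  decide

theorem surroundNumbersByBrackets_tight : Claim_exact_surroundNumbersByBrackets := by
  intro s _ hD h
  have hl : loopA s.toList [] [] = renderB (groupsB s.toList) := by
    have := congrArg String.toList h
    simpa [surroundNumbersByBrackets, surroundNumbersByBrackets_alt] using this
  rw [loopA_eq_bdrop] at hl
  have hlast : s.toList.getLast?.any Char.isDigit = true := hD
  have := bdrop_lt_balt s.toList.length s.toList (Nat.le_refl _) hlast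
  rw [hl] at this
  exact Nat.lt_irrefl _ this
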